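-- pv_equiv track=rewrite | github.com/up-n-atom/8311 | gen-docs.py | get_indicies
-- ===== SOURCE A (Python) =====
-- def get_indicies(nav):
--     home_index = next(
--         (index for (index, d) in enumerate(nav) if d.get("Home") != None),
--         None,
--     )
--     teng_epon_index = next(
--         (index for (index, d) in enumerate(nav) if d.get("10G-EPON") != None),
--         None,
--     )
--     epon_index = next(
--         (index for (index, d) in enumerate(nav) if d.get("EPON") != None),
--         None,
--     )
--     gpon_index = next(
--         (index for (index, d) in enumerate(nav) if d.get("GPON") != None),
--         None,
--     )
--     xgs_pon_index = next(
--         (index for (index, d) in enumerate(nav) if d.get("XGS-PON") != None),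
--         None,
--     )
--
--     return (home_index, teng_epon_index, epon_index, gpon_index, xgs_pon_index)
-- ===== SOURCE B (Python) =====
-- def get_indicies(nav):
--     home = teng_epon = epon = gpon = xgs_pon = None
--     for index, d in enumerate(nav):
--         if home is None and d.get("Home") != None:
--             home = index
--         if teng_epon is None and d.get("10G-EPON") != None:
--             teng_epon = index
--         if epon is None and d.get("EPON") != None:
--             epon = index
--         if gpon is None and d.get("GPON") != None:
--             gpon = index
--         if xgs_pon is None and d.get("XGS-PON") != None:
--             xgs_pon = index
--     return (home, teng_epon, epon, gpon, xgs_pon)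
-- ===== Notes on version B (the rewrite author's own statement) =====
-- stated objective: alternative
-- what changed: Replaces the five separate next()-over-enumerate scans (each walking nav from the start) with a single pass over enumerate(nav) that records the first hit index for each of the five keys in accumulator variables.
import Mathlib
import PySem

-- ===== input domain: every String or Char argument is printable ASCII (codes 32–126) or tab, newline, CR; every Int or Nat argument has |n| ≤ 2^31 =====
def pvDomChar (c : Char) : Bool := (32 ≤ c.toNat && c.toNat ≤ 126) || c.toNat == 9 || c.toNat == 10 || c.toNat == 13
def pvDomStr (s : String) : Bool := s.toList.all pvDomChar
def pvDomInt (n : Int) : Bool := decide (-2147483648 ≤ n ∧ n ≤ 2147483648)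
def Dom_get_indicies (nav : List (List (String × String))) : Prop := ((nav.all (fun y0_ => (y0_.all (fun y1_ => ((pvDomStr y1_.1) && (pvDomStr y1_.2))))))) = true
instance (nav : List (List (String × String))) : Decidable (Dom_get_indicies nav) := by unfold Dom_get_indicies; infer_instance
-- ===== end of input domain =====

-- B replaces A's five separate next()-over-enumerate scans with one pass that records
-- the first hit index per key (objective: alternative single-pass decomposition).

-- ===== PORT A =====
-- A-side helper: one 'next((index for (index, d) in enumerate(nav) if d.get(key) != None), None)' scan
def pvScanA (key : String) (nav : List (List (String × String))) : Option Int :=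
  ((PySem.List.enumerate nav).find? (fun p => ((PySem.Dict.mk p.2).get? key).isSome)).map (fun p => p.1)

def get_indicies (nav : List (List (String × String))) : Option Int × Option Int × Option Int × Option Int × Option Int :=
  (pvScanA "Home" nav, pvScanA "10G-EPON" nav, pvScanA "EPON" nav, pvScanA "GPON" nav, pvScanA "XGS-PON" nav)

-- ===== PORT B =====
-- B-side: one fold over enumerate(nav) updating the five accumulators
def pvStepB (st : Option Int × Option Int × Option Int × Option Int × Option Int)
    (p : Int × List (String × String)) : Option Int × Option Int × Option Int × Option Int × Option Int :=
  let d := PySem.Dict.mk p.2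
  ((if st.1.isNone && (d.get? "Home").isSome then some p.1 else st.1),
   (if st.2.1.isNone && (d.get? "10G-EPON").isSome then some p.1 else st.2.1),
   (if st.2.2.1.isNone && (d.get? "EPON").isSome then some p.1 else st.2.2.1),
   (if st.2.2.2.1.isNone && (d.get? "GPON").isSome then some p.1 else st.2.2.2.1),
   (if st.2.2.2.2.isNone && (d.get? "XGS-PON").isSome then some p.1 else st.2.2.2.2))

def get_indicies_alt (nav : List (List (String × String))) : Option Int × Option Int × Option Int × Option Int × Option Int :=
  (PySem.List.enumerate nav).foldl pvStepB (none, none, none, none, none)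

-- ===== PRECONDITION & SPEC =====
def Spec_get_indicies (nav : List (List (String × String))) (out : Option Int × Option Int × Option Int × Option Int × Option Int) : Prop := out = get_indicies_alt nav
instance (nav : List (List (String × String))) (out : Option Int × Option Int × Option Int × Option Int × Option Int) : Decidable (Spec_get_indicies nav out) := by unfold Spec_get_indicies; infer_instance

-- ===== CLAIM (what is proved, stated in full; the proofs are below) =====
def Claim_equal_get_indicies : Prop := ∀ (nav : List (List (String × String))), Dom_get_indicies nav → Spec_get_indicies nav (get_indicies nav)

-- ===== LEMMAS AND PROOFS =====

-- one-key accumulator step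
def pvStep1 (key : String) (acc : Option Int) (p : Int × List (String × String)) : Option Int :=
  if acc.isNone && ((PySem.Dict.mk p.2).get? key).isSome then some p.1 else acc

theorem foldl_step1_some (key : String) (j : Int) (l : List (Int × List (String × String))) :
    l.foldl (pvStep1 key) (some j) = some j := by
  induction l with
  | nil => rfl
  | cons p l ih => simpa [pvStep1] using ih

-- the five-tuple fold is the five one-key folds componentwise
theorem foldl_stepB_split (l : List (Int × List (String × String)))
    (a b c d e : Option Int) :
    l.foldl pvStepB (a, b, c, d, e) =
      (l.foldl (pvStep1 "Home") a, l.foldl (pvStep1 "10G-EPON") b,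
       l.foldl (pvStep1 "EPON") c, l.foldl (pvStep1 "GPON") d,
       l.foldl (pvStep1 "XGS-PON") e) := by
  induction l generalizing a b c d e with
  | nil => rfl
  | cons p l ih => simp [List.foldl_cons, pvStepB, pvStep1, ih]

-- the one-key fold from none is A's scan
theorem foldl_step1_eq_scanA (key : String) (nav : List (List (String × String))) (s : Int) :
    (PySem.List.enumerate nav s).foldl (pvStep1 key) none =
      ((PySem.List.enumerate nav s).find? (fun p => ((PySem.Dict.mk p.2).get? key).isSome)).map
        (fun p => p.1) := by
  induction nav generalizing s with
  | nil => rfl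
  | cons d nav ih =>
      rw [PySem.List.enumerate_cons]
      by_cases h : ((PySem.Dict.mk d).get? key).isSome
      · simp [h, pvStep1, foldl_step1_some]
      · simp [h, pvStep1, ih]

-- ===== VERDICT (by name: the statement is the Claim_ definition above) =====
theorem get_indicies_spec : Claim_equal_get_indicies := by
  intro nav _
  unfold Spec_get_indicies get_indicies get_indicies_alt pvScanA
  rw [foldl_stepB_split]
  simp [foldl_step1_eq_scanA]
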